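-- pv_equiv track=rewrite | github.com/Naico17/subasta_acciones | src/recursivaMemorización.py | recursive_memoization
-- ===== SOURCE A (Python) =====
-- from functools import lru_cache
--
-- def recursive_memoization(A, N, l, u, p):
--     """
--     Versión recursiva con memoización (top-down) para la subasta de acciones.
--     Usa un caché interno para guardar los subproblemas (i, a).
--     """
--     # Subproblema:
--     # ¿Cuál es la ganancia máxima que puedo obtener usando los primeros i oferentes
--     # y teniendo shares acciones disponibles?
--
--
--
--     @lru_cache(maxsize=None)
--     def memo_helper(i, shares):
--         # Caso base: no hay oferentes o no hay acciones
--         if i == 0 or shares == 0: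
--             return 0                #ganancia 0
--
--         # Opción 1: no asignar acciones al oferente i, se ignora el oferente i-1 y se resuelve el problema para i-1 oferentes
--         best = memo_helper(i - 1, shares)
--
--         # Opción 2: asignar x acciones al oferente i-1
--         min_i = l[i - 1]
--         max_i = u[i - 1]
--
--         if shares >= min_i:
--             upper_limit = min(max_i, shares)
--             for x in range(min_i, upper_limit + 1):
--                 value = p[i - 1] * x + memo_helper(i - 1, shares - x)
--                 if value > best:
--                     best = value
--
--         return best
--
--     # Llamada inicial: considerar N oferentes y A acciones
--     return memo_helper(N, A)
-- ===== SOURCE B (Python) =====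
-- def recursive_memoization(A, N, l, u, p):
--     """
--     Forward (bottom-up) state-space DP: sweep the bidders from the last one
--     considered to the first, maintaining a dict mapping each reachable number
--     of remaining shares to the best profit accumulated so far.  A state with
--     0 remaining shares is final and is only carried forward unchanged.
--     """
--     if A == 0 or N <= 0:      # nothing to allocate / nobody to allocate to
--         return 0
--     states = {A: 0}
--     for i in range(N - 1, -1, -1):
--         nxt = {}
--         for s, g in states.items():
--             if s not in nxt or g > nxt[s]:   # option: give bidder i nothing
--                 nxt[s] = g
--             if s != 0 and s >= l[i]:         # option: give bidder i x shares
--                 for x in range(l[i], min(u[i], s) + 1):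
--                     s2 = s - x
--                     g2 = g + p[i] * x
--                     if s2 not in nxt or g2 > nxt[s2]:
--                         nxt[s2] = g2
--         states = nxt
--     return max(states.values(), default=0)
-- ===== Notes on version B (the rewrite author's own statement) =====
-- stated objective: alternative
-- what changed: Replaces A's top-down lru_cache recursion over (bidder, shares) subproblems by an iterative forward sweep over the bidders that maintains a dict of reachable states (remaining shares -> best profit so far) and returns the best profit over the final states.
import Mathlib
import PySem

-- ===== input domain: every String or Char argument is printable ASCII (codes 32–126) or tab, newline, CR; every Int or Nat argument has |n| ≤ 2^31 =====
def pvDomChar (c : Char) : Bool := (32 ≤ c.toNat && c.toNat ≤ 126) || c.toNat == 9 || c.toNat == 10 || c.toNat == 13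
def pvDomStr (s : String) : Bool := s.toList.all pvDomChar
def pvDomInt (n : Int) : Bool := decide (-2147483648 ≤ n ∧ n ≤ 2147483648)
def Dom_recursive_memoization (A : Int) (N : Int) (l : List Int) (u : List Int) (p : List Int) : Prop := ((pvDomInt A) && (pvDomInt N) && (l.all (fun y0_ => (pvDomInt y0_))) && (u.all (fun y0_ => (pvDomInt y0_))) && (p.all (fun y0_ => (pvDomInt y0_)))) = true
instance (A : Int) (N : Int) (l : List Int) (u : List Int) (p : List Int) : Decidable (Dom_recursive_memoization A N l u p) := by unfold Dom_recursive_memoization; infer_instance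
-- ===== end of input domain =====

-- B replaces A's top-down memoized recursion by a forward state-space sweep over the
-- bidders that folds reachable (remaining-shares ↦ best-profit) states into a dict
-- (objective: alternative algorithm, same exact result).

-- ===== PORT A =====
-- memo_helper: the lru_cache only speeds the Python up; the recursion itself is on i.
-- l[i-1]/u[i-1]/p[i-1] are ported with pyGetD _ _ 0: the index is nonnegative and,
-- under Pre_ (N within the list lengths), always in range, so this is exact there.
def memoHelperA (l u p : List Int) : Nat → Int → Int
  | 0, _ => 0
  | i + 1, shares =>
    if shares = 0 then 0
    else
      let best := memoHelperA l u p i shares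
      let min_i := PySem.List.pyGetD l (i : Int) 0
      let max_i := PySem.List.pyGetD u (i : Int) 0
      if min_i ≤ shares then
        (PySem.List.pyRange min_i (min max_i shares + 1) 1).foldl
          (fun best x =>
            let value := PySem.List.pyGetD p (i : Int) 0 * x + memoHelperA l u p i (shares - x)
            if value > best then value else best) best
      else best

def recursive_memoization (A : Int) (N : Int) (l : List Int) (u : List Int) (p : List Int) : Int :=
  memoHelperA l u p N.toNat A

-- ===== PORT B =====
-- "if s not in nxt or g > nxt[s]: nxt[s] = g"
def maxIns (d : PySem.Dict Int Int) (s g : Int) : PySem.Dict Int Int :=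
  match d.get? s with
  | none => d.insert s g
  | some g0 => if g > g0 then d.insert s g else d

-- one round of Source B's outer loop: fold every state (s, g) of `states` into `nxt`
def stepB (l u p : List Int) (i : Int) (states : PySem.Dict Int Int) : PySem.Dict Int Int :=
  states.items.foldl (fun nxt sg =>
    let nxt1 := maxIns nxt sg.1 sg.2
    if sg.1 ≠ 0 ∧ PySem.List.pyGetD l i 0 ≤ sg.1 then
      (PySem.List.pyRange (PySem.List.pyGetD l i 0)
          (min (PySem.List.pyGetD u i 0) sg.1 + 1) 1).foldl
        (fun nxt x => maxIns nxt (sg.1 - x) (sg.2 + PySem.List.pyGetD p i 0 * x)) nxt1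
    else nxt1) PySem.Dict.empty

def recursive_memoization_alt (A : Int) (N : Int) (l : List Int) (u : List Int) (p : List Int) : Int :=
  if A = 0 ∨ N ≤ 0 then 0
  else
    let states := (PySem.List.pyRange (N - 1) (-1) (-1)).foldl
      (fun st i => stepB l u p i st) (PySem.Dict.empty.insert A 0)
    PySem.List.maxD states.values (fun g => g) 0

-- ===== PRECONDITION & SPEC =====
-- Exactly where the Python A returns: with A = 0 the first call hits the base case
-- and returns 0 for any N; otherwise N < 0 exhausts the recursion (RecursionError)
-- and N beyond a list's length raises IndexError.
def Pre_recursive_memoization (A : Int) (N : Int) (l : List Int) (u : List Int) (p : List Int) : Prop :=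
  A = 0 ∨ (0 ≤ N ∧ N ≤ (l.length : Int) ∧ N ≤ (u.length : Int) ∧ N ≤ (p.length : Int))

instance (A : Int) (N : Int) (l : List Int) (u : List Int) (p : List Int) : Decidable (Pre_recursive_memoization A N l u p) := by
  unfold Pre_recursive_memoization; infer_instance

def pvWitness_recursive_memoization : Int × Int × List Int × List Int × List Int :=
  (5, 2, [1, 1], [3, 2], [4, 7])

def Spec_recursive_memoization (A : Int) (N : Int) (l : List Int) (u : List Int) (p : List Int) (out : Int) : Prop :=
  out = recursive_memoization_alt A N l u p

instance (A : Int) (N : Int) (l : List Int) (u : List Int) (p : List Int) (out : Int) : Decidable (Spec_recursive_memoization A N l u p out) := by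
  unfold Spec_recursive_memoization; infer_instance

-- ===== CLAIM =====
def Claim_equal_recursive_memoization : Prop :=
  ∀ (A : Int) (N : Int) (l : List Int) (u : List Int) (p : List Int),
    Dom_recursive_memoization A N l u p → Pre_recursive_memoization A N l u p →
      Spec_recursive_memoization A N l u p (recursive_memoization A N l u p)

-- ===== LEMMAS AND PROOFS =====

-- max of two optional values (none = "no candidate yet")
def omax : Option Int → Option Int → Option Int
  | none, b => b
  | some a, none => some a
  | some a, some b => some (max a b)

-- running max of a list, none on []
def lmax (xs : List Int) : Option Int :=
  xs.foldl (fun acc x => omax acc (some x)) none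

-- profit of a pair (remaining shares s, accumulated gain g) when j bidders remain
def pf (l u p : List Int) (j : Nat) (sg : Int × Int) : Int :=
  sg.2 + memoHelperA l u p j sg.1

-- the Int indices [j-1, j-2, …, 0]
def downList : Nat → List Int
  | 0 => []
  | j + 1 => (j : Int) :: downList j

theorem omax_none_right (a : Option Int) : omax a none = a := by
  cases a <;> rfl

theorem omax_assoc (a b c : Option Int) : omax (omax a b) c = omax a (omax b c) := by
  cases a <;> cases b <;> cases c <;> simp [omax, max_assoc]

theorem omax_comm (a b : Option Int) : omax a b = omax b a := by
  cases a <;> cases b <;> simp [omax, max_comm]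

theorem lmax_foldl (t : List Int) (acc : Option Int) :
    t.foldl (fun a x => omax a (some x)) acc = omax acc (lmax t) := by
  induction t generalizing acc with
  | nil => simp [lmax, omax_none_right]
  | cons x t ih =>
      simp only [List.foldl_cons, lmax, show ∀ b, omax none b = b from fun b => rfl]
      rw [ih, ih (some x), ← omax_assoc]


theorem lmax_cons (x : Int) (t : List Int) : lmax (x :: t) = omax (some x) (lmax t) := by
  simp only [lmax, List.foldl_cons]
  have := lmax_foldl t (some x)
  simpa [lmax] using this


theorem lmax_append (xs ys : List Int) : lmax (xs ++ ys) = omax (lmax xs) (lmax ys) := by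
  simp only [lmax, List.foldl_append]
  rw [lmax_foldl]
  rfl


theorem lmax_mem_le {y : Int} {ys : List Int} (h : y ∈ ys) :
    ∃ m, lmax ys = some m ∧ y ≤ m := by
  induction ys with
  | nil => cases h
  | cons a t ih =>
      rw [lmax_cons]
      rcases List.mem_cons.mp h with rfl | hmem
      · cases htl : lmax t with
        | none => exact ⟨y, rfl, le_refl _⟩
        | some m' => exact ⟨max y m', rfl, le_max_left _ _⟩
      · rcases ih hmem with ⟨m, hm, hy⟩
        rw [hm]
        exact ⟨max a m, rfl, le_trans hy (le_max_right _ _)⟩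


theorem pymax_eq_lmax (xs : List Int) : PySem.List.max? xs (fun g => g) = lmax xs := by
  simp only [PySem.List.max?, lmax]
  congr 1
  funext acc x
  cases acc with
  | none => rfl
  | some m =>
      simp only [omax]
      by_cases h : m < x
      · simp [h, max_eq_right h.le]
      · simp [h, max_eq_left (not_lt.mp h)]


-- replacing the (unique) entry with key s by a larger value
theorem lmax_map_replace (F : Int × Int → Int)
    (hF : ∀ s a b, a ≤ b → F (s, a) ≤ F (s, b)) :
    ∀ (items : List (Int × Int)) (s g g0 : Int),
      (items.map Prod.fst).Nodup → (s, g0) ∈ items → g0 ≤ g →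
      lmax ((items.map (fun q => if q.1 == s then (s, g) else q)).map F)
        = omax (lmax (items.map F)) (some (F (s, g))) := by
  intro items
  induction items with
  | nil => intro s g g0 _ hmem; cases hmem
  | cons q t ih =>
      intro s g g0 hnd hmem hle
      simp only [List.map_cons, List.nodup_cons] at hnd ⊢
      obtain ⟨hq, hndt⟩ := hnd
      rcases List.mem_cons.mp hmem with rfl | hmem'
      · -- head is the replaced entry
        simp only [beq_self_eq_true, if_pos]
        have ht : t.map (fun q => if q.1 == s then (s, g) else q) = t := by
          conv_rhs => rw [← List.map_id t]
          apply List.map_congr_left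
          intro q' hq'
          have hne : q'.1 ≠ s := by
            intro h
            apply hq
            have hm : q'.1 ∈ t.map Prod.fst := List.mem_map_of_mem (f := Prod.fst) hq'
            rwa [h] at hm
          simp [hne]
        rw [ht, lmax_cons, lmax_cons, omax_comm (omax _ _), ← omax_assoc]
        have : omax (some (F (s, g))) (some (F (s, g0))) = some (F (s, g)) := by
          simp [omax, max_eq_left (hF s g0 g hle)]
        rw [this]
      · -- the replaced entry is in the tail
        have hq1 : q.1 ≠ s := by
          intro h
          apply hq
          have hm : (s, g0).1 ∈ t.map Prod.fst := List.mem_map_of_mem (f := Prod.fst) hmem'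
          rw [h]
          exact hm
        have hbeq : (q.1 == s) = false := beq_false_of_ne hq1
        simp only [hbeq, Bool.false_eq_true, ite_false]
        rw [lmax_cons, lmax_cons, ih s g g0 hndt hmem' hle, ← omax_assoc]


theorem maxIns_nodup (d : PySem.Dict Int Int) (s g : Int) (h : d.keys.Nodup) :
    (maxIns d s g).keys.Nodup := by
  unfold maxIns
  cases d.get? s with
  | none => exact PySem.Dict.nodup_keys_insert d s g h
  | some g0 =>
      by_cases hg : g > g0
      · simp only [if_pos hg]; exact PySem.Dict.nodup_keys_insert d s g h
      · simp only [if_neg hg]; exact h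


theorem lmax_maxIns (F : Int × Int → Int)
    (hF : ∀ s a b, a ≤ b → F (s, a) ≤ F (s, b))
    (d : PySem.Dict Int Int) (hnd : d.keys.Nodup) (s g : Int) :
    lmax (((maxIns d s g).items).map F) = omax (lmax (d.items.map F)) (some (F (s, g))) := by
  unfold maxIns
  cases hget : d.get? s with
  | none =>
      have hc : d.contains s = false := by
        rw [PySem.Dict.contains_eq_isSome_get?, hget]; rfl
      rw [PySem.Dict.items_insert_of_not_contains d g hc, List.map_append, lmax_append]
      rfl
  | some g0 =>
      have hc : d.contains s = true := by
        rw [PySem.Dict.contains_eq_isSome_get?, hget]; rfl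
      have hmem : (s, g0) ∈ d.items := PySem.Dict.mem_items_of_get?_eq_some d hget
      by_cases hg : g > g0
      · simp only [if_pos hg]
        rw [PySem.Dict.items_insert_of_contains d g hc]
        have hnd' : (d.items.map Prod.fst).Nodup := hnd
        exact lmax_map_replace F hF d.items s g g0 hnd' hmem hg.le
      · simp only [if_neg hg]
        have hFmem : F (s, g0) ∈ d.items.map F := List.mem_map_of_mem hmem
        obtain ⟨m, hm, hym⟩ := lmax_mem_le hFmem
        rw [hm]
        have : F (s, g) ≤ m := le_trans (hF s g g0 (not_lt.mp hg)) hym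
        simp [omax, max_eq_left this]


theorem lmax_inner_fold (F : Int × Int → Int)
    (hF : ∀ s a b, a ≤ b → F (s, a) ≤ F (s, b))
    (xs : List Int) (s g pi : Int) :
    ∀ (acc : PySem.Dict Int Int), acc.keys.Nodup →
      lmax (((xs.foldl (fun d x => maxIns d (s - x) (g + pi * x)) acc).items).map F)
          = omax (lmax (acc.items.map F)) (lmax (xs.map (fun x => F (s - x, g + pi * x))))
        ∧ (xs.foldl (fun d x => maxIns d (s - x) (g + pi * x)) acc).keys.Nodup := by
  induction xs with
  | nil =>
      intro acc hacc
      exact ⟨(omax_none_right _).symm, hacc⟩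
  | cons x t ih =>
      intro acc hacc
      simp only [List.foldl_cons, List.map_cons]
      obtain ⟨h1, h2⟩ := ih (maxIns acc (s - x) (g + pi * x)) (maxIns_nodup _ _ _ hacc)
      refine ⟨?_, h2⟩
      rw [h1, lmax_maxIns F hF acc hacc, lmax_cons, omax_assoc]


theorem memoHelperA_zero (l u p : List Int) (j : Nat) : memoHelperA l u p j 0 = 0 := by
  cases j <;> simp [memoHelperA]

theorem foldl_if_gt (v : Int → Int) (xs : List Int) :
    ∀ b : Int, xs.foldl (fun best x => if v x > best then v x else best) b
      = (xs.map v).foldl max b := by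
  induction xs with
  | nil => intro b; rfl
  | cons x t ih =>
      intro b
      simp only [List.foldl_cons, List.map_cons]
      rw [ih]
      congr 1
      by_cases h : v x > b
      · simp [h, max_eq_right h.le]
      · simp [h, max_eq_left (not_lt.mp h)]


theorem omax_foldl_max (ys : List Int) :
    ∀ (b g : Int), omax (some (g + b)) (lmax (ys.map (fun y => g + y))) = some (g + ys.foldl max b) := by
  induction ys with
  | nil => intro b g; rfl
  | cons y t ih =>
      intro b g
      simp only [List.map_cons, List.foldl_cons]
      rw [lmax_cons, ← omax_assoc]
      have : omax (some (g + b)) (some (g + y)) = some (g + max b y) := by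
        simp only [omax]
        rw [max_add_add_left]
      rw [this, ih (max b y) g]


-- the candidates generated from one state (s, g) at bidder j reach exactly pf (j+1)
theorem pf_step (l u p : List Int) (j : Nat) (s g : Int) (h0 : s ≠ 0)
    (hge : PySem.List.pyGetD l (j : Int) 0 ≤ s) :
    omax (some (pf l u p j (s, g)))
        (lmax ((PySem.List.pyRange (PySem.List.pyGetD l (j : Int) 0)
            (min (PySem.List.pyGetD u (j : Int) 0) s + 1) 1).map
          (fun x => pf l u p j (s - x, g + PySem.List.pyGetD p (j : Int) 0 * x))))
      = some (pf l u p (j + 1) (s, g)) := by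
  have hsucc : memoHelperA l u p (j + 1) s
      = ((PySem.List.pyRange (PySem.List.pyGetD l (j : Int) 0)
          (min (PySem.List.pyGetD u (j : Int) 0) s + 1) 1).map
            (fun x => PySem.List.pyGetD p (j : Int) 0 * x + memoHelperA l u p j (s - x))).foldl
          max (memoHelperA l u p j s) := by
    simp only [memoHelperA]
    rw [if_neg h0, if_pos hge, foldl_if_gt]
  simp only [pf, hsucc]
  rw [show ((PySem.List.pyRange (PySem.List.pyGetD l (j : Int) 0)
        (min (PySem.List.pyGetD u (j : Int) 0) s + 1) 1).map
          (fun x => (g + PySem.List.pyGetD p (j : Int) 0 * x) + memoHelperA l u p j (s - x)))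
      = ((PySem.List.pyRange (PySem.List.pyGetD l (j : Int) 0)
        (min (PySem.List.pyGetD u (j : Int) 0) s + 1) 1).map
          (fun x => PySem.List.pyGetD p (j : Int) 0 * x + memoHelperA l u p j (s - x))).map
          (fun y => g + y) from by
    rw [List.map_map]; apply List.map_congr_left; intro x _; simp [Function.comp, add_assoc]]
  exact omax_foldl_max _ (memoHelperA l u p j s) g


theorem pf_skip (l u p : List Int) (j : Nat) (s g : Int)
    (h : ¬(s ≠ 0 ∧ PySem.List.pyGetD l (j : Int) 0 ≤ s)) :
    pf l u p j (s, g) = pf l u p (j + 1) (s, g) := by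
  simp only [pf]
  congr 1
  by_cases hs : s = 0
  · subst hs; rw [memoHelperA_zero, memoHelperA_zero]
  · have hlt : ¬ PySem.List.pyGetD l (j : Int) 0 ≤ s := by
      intro hge; exact h ⟨hs, hge⟩
    simp only [memoHelperA]
    rw [if_neg hs, if_neg hlt]


theorem stepB_fold (l u p : List Int) (j : Nat) (pairs : List (Int × Int)) :
    ∀ (acc : PySem.Dict Int Int), acc.keys.Nodup →
      lmax (((pairs.foldl (fun nxt sg =>
          let nxt1 := maxIns nxt sg.1 sg.2
          if sg.1 ≠ 0 ∧ PySem.List.pyGetD l (j : Int) 0 ≤ sg.1 then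
            (PySem.List.pyRange (PySem.List.pyGetD l (j : Int) 0)
                (min (PySem.List.pyGetD u (j : Int) 0) sg.1 + 1) 1).foldl
              (fun nxt x => maxIns nxt (sg.1 - x) (sg.2 + PySem.List.pyGetD p (j : Int) 0 * x)) nxt1
          else nxt1) acc).items).map (pf l u p j))
          = omax (lmax (acc.items.map (pf l u p j))) (lmax (pairs.map (pf l u p (j + 1))))
        ∧ (pairs.foldl (fun nxt sg =>
          let nxt1 := maxIns nxt sg.1 sg.2
          if sg.1 ≠ 0 ∧ PySem.List.pyGetD l (j : Int) 0 ≤ sg.1 then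
            (PySem.List.pyRange (PySem.List.pyGetD l (j : Int) 0)
                (min (PySem.List.pyGetD u (j : Int) 0) sg.1 + 1) 1).foldl
              (fun nxt x => maxIns nxt (sg.1 - x) (sg.2 + PySem.List.pyGetD p (j : Int) 0 * x)) nxt1
          else nxt1) acc).keys.Nodup := by
  induction pairs with
  | nil =>
      intro acc hacc
      exact ⟨(omax_none_right _).symm, hacc⟩
  | cons sg rest ih =>
      intro acc hacc
      simp only [List.foldl_cons, List.map_cons]
      by_cases hc : sg.1 ≠ 0 ∧ PySem.List.pyGetD l (j : Int) 0 ≤ sg.1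
      · simp only [if_pos hc]
        obtain ⟨hin, hin2⟩ := lmax_inner_fold (pf l u p j)
          (fun s a b hab => by simp only [pf]; exact add_le_add hab (le_refl _))
          (PySem.List.pyRange (PySem.List.pyGetD l (j : Int) 0)
            (min (PySem.List.pyGetD u (j : Int) 0) sg.1 + 1) 1) sg.1 sg.2
          (PySem.List.pyGetD p (j : Int) 0)
          (maxIns acc sg.1 sg.2) (maxIns_nodup _ _ _ hacc)
        obtain ⟨h1, h2⟩ := ih _ hin2
        refine ⟨?_, h2⟩
        rw [h1, hin, lmax_maxIns (pf l u p j)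
          (fun s a b hab => by simp only [pf]; exact add_le_add hab (le_refl _)) acc hacc sg.1 sg.2]
        rw [lmax_cons, omax_assoc, omax_assoc]
        congr 1
        rw [← omax_assoc]
        congr 1
        have := pf_step l u p j sg.1 sg.2 hc.1 hc.2
        simpa using this
      · simp only [if_neg hc]
        obtain ⟨h1, h2⟩ := ih _ (maxIns_nodup _ _ _ hacc)
        refine ⟨?_, h2⟩
        rw [h1, lmax_maxIns (pf l u p j)
          (fun s a b hab => by simp only [pf]; exact add_le_add hab (le_refl _)) acc hacc sg.1 sg.2]
        rw [lmax_cons, omax_assoc]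
        congr 2
        have := pf_skip l u p j sg.1 sg.2 hc
        simpa using this


theorem stepB_lmax (l u p : List Int) (j : Nat) (d : PySem.Dict Int Int) :
    lmax ((stepB l u p (j : Int) d).items.map (pf l u p j))
      = lmax (d.items.map (pf l u p (j + 1))) := by
  unfold stepB
  obtain ⟨h1, _⟩ := stepB_fold l u p j d.items PySem.Dict.empty PySem.Dict.nodup_keys_empty
  rw [h1]
  rfl



theorem downList_succ (j : Nat) : downList (j + 1) = (j : Int) :: downList j := rfl

theorem downList_eq_map (n : Nat) :
    (List.range n).map (fun (k : Nat) => (n : Int) - 1 - (k : Int)) = downList n := by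
  induction n with
  | zero => rfl
  | succ m ih =>
      rw [List.range_succ_eq_map, List.map_cons, List.map_map, downList_succ]
      congr 1
      · push_cast; ring
      · rw [← ih]
        apply List.map_congr_left
        intro k _
        simp only [Function.comp]
        push_cast
        ring


theorem loop_lemma (l u p : List Int) :
    ∀ (j : Nat) (d : PySem.Dict Int Int),
      lmax (((downList j).foldl (fun st i => stepB l u p i st) d).items.map (pf l u p 0))
        = lmax (d.items.map (pf l u p j)) := by
  intro j
  induction j with
  | zero => intro d; rfl
  | succ j ih =>
      intro d
      rw [downList_succ, List.foldl_cons, ih (stepB l u p (j : Int) d), stepB_lmax]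


theorem pyRange_down (n : Nat) :
    PySem.List.pyRange ((n : Int) - 1) (-1) (-1) = downList n := by
  rw [← downList_eq_map]
  simp only [PySem.List.pyRange]
  norm_num
  rw [show (if 0 < n then n else 0) = n from by split <;> omega]
  apply List.map_congr_left
  intro k _
  ring


-- ===== VERDICT =====
theorem recursive_memoization_spec : Claim_equal_recursive_memoization := by
  intro A N l u p _ _
  unfold Spec_recursive_memoization recursive_memoization recursive_memoization_alt
  by_cases htriv : A = 0 ∨ N ≤ 0
  case pos =>
    rw [if_pos htriv]
    rcases htriv with hA | hN
    · subst hA; exact memoHelperA_zero l u p N.toNat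
    · rw [show N.toNat = 0 from by omega]
      rfl
  case neg =>
  push Not at htriv
  rw [if_neg (by push Not; exact htriv)]
  have hN : 0 ≤ N := le_of_lt htriv.2
  rw [show N - 1 = (N.toNat : Int) - 1 from by omega, pyRange_down]
  set dfin := (downList N.toNat).foldl (fun st i => stepB l u p i st)
    (PySem.Dict.empty.insert A 0) with hdfin
  have hinit : (PySem.Dict.empty.insert A (0 : Int)).items = [(A, 0)] := by
    rw [PySem.Dict.items_insert_of_not_contains _ _ (by simp)]
    rfl
  have h1 := loop_lemma l u p N.toNat (PySem.Dict.empty.insert A 0)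
  rw [hinit] at h1
  have hmap : dfin.items.map (pf l u p 0) = dfin.items.map (fun q => q.2) := by
    apply List.map_congr_left
    intro q _
    simp [pf, memoHelperA]
  have hvals : lmax dfin.values = some (memoHelperA l u p N.toNat A) := by
    have : dfin.values = dfin.items.map (fun q => q.2) := rfl
    rw [this, ← hmap, ← hdfin] at *
    rw [h1]
    simp [lmax, omax, pf]
  rw [show PySem.List.maxD dfin.values (fun g => g) 0
      = (PySem.List.max? dfin.values (fun g => g)).getD 0 from rfl, pymax_eq_lmax, hvals]
  rfl
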